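-- pv_equiv track=rewrite | github.com/Didios/Minecraft_IDE | prototype/test.py | compact_json
-- ===== SOURCE A (Python) =====
-- def compact_json(content):
--     """
--     compact a json into a one line string
--     """
--     con = ""
--     previous = ""
--     for c in content:
--         if c not in ['\n', '\t', '\r'] and (previous != ':' or (previous == ':' and c != ' ')):
--             con += c
--
--         previous = c
--
--     return con
-- ===== SOURCE B (Python) =====
-- def compact_json(content):
--     """
--     compact a json into a one line string
--     """
--     head, *rest = content.split(':')
--     joined = ':'.join([head] + [p[1:] if p[:1] == ' ' else p for p in rest])
--     return joined.translate({10: None, 9: None, 13: None})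
-- ===== Notes on version B (the rewrite author's own statement) =====
-- stated objective: faster
-- what changed: Replaced A's single stateful per-character loop (accumulator plus a 'previous' variable) with staged whole-string operations: split on the colon character, strip one leading space from every part after the first, join the parts back, then delete newline/tab/CR via str.translate.
import Mathlib
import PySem

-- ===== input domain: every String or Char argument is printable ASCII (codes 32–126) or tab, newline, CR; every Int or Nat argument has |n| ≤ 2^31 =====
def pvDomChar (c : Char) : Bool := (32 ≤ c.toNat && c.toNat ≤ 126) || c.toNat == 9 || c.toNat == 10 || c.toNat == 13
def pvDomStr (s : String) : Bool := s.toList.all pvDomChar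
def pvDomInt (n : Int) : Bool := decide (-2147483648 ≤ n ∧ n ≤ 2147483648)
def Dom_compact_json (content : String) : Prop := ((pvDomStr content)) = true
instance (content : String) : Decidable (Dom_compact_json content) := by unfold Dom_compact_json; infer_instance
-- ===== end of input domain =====

-- B replaces A's single stateful per-character loop by staged string operations:
-- split on ':', strip one leading space of every part after the first, join with ':',
-- then delete '\n'/'\t'/'\r' — same return value, different decomposition (no per-char state).

-- ===== PORT A =====
-- A's loop state: (con, previous); Python's one-char strings are modelled as List Char
-- ("" ↦ [], a single char c ↦ [c]); con is built by appending, exactly as A does.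
def compact_json_step (st : List Char × List Char) (c : Char) : List Char × List Char :=
  (if c ∉ ['\n', '\t', '\r'] ∧ (st.2 ≠ [':'] ∨ (st.2 = [':'] ∧ c ≠ ' ')) then st.1 ++ [c]
   else st.1,
   [c])

def compact_json (content : String) : String :=
  String.mk (content.toList.foldl compact_json_step ([], [])).1

-- ===== PORT B =====
-- Source B: `p[1:] if p[:1] == ' ' else p` — both subscripts are Python slices.
def compact_json_strip1 (p : List Char) : List Char :=
  if PySem.List.slice p none (some 1) = [' '] then PySem.List.slice p (some 1) none else p

-- Source B: head, *rest = content.split(':'); join; then str.translate({10: None, 9: None, 13: None}).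
-- translate with a delete-only table is exactly a filter dropping those code points (ported by hand).
-- split(':') never returns an empty list, so the [] branch is unreachable (Python would raise there).
def compact_json_alt (content : String) : String :=
  match PySem.Chars.splitOn content.toList [':'] with
  | [] => ""
  | head :: rest =>
      String.mk ((PySem.Chars.join [':'] (head :: rest.map compact_json_strip1)).filter
        (fun c => !(c == '\n' || c == '\t' || c == '\r')))

-- ===== PRECONDITION & SPEC =====
def Spec_compact_json (content : String) (out : String) : Prop := out = compact_json_alt content
instance (content : String) (out : String) : Decidable (Spec_compact_json content out) := by unfold Spec_compact_json; infer_instance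

-- ===== CLAIM (what is proved, stated in full; the proofs are below) =====
def Claim_equal_compact_json : Prop := ∀ (content : String), Dom_compact_json content → Spec_compact_json content (compact_json content)

-- ===== LEMMAS AND PROOFS =====

-- keep a char unless it is \n/\t/\r
def cjNotWS (c : Char) : Bool := !(c == '\n' || c == '\t' || c == '\r')

-- structural model of split on ':' (cur = current part, reversed)
def cjS (cur : List Char) : List Char → List (List Char)
  | [] => [cur.reverse]
  | c :: r => if c = ':' then cur.reverse :: cjS [] r else cjS (c :: cur) r

-- original string with the one space right after each ':' removed; b = "previous char was ':'"
def cjR (b : Bool) : List Char → List Char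
  | [] => []
  | c :: r => if b && c == ' ' then cjR false r else c :: cjR (c == ':') r

def cjStripHead (p : List Char) : List Char :=
  if p.head? = some ' ' then p.tail else p

-- A's remaining output from a given 'previous' state.
def compact_json_goA : List Char → List Char → List Char
  | _, [] => []
  | prev, c :: cs =>
      (if c ∉ ['\n', '\t', '\r'] ∧ (prev ≠ [':'] ∨ (prev = [':'] ∧ c ≠ ' ')) then [c] else []) ++
        compact_json_goA [c] cs

theorem compact_json_foldA (cs : List Char) : ∀ (acc prev : List Char),
    (cs.foldl compact_json_step (acc, prev)).1 = acc ++ compact_json_goA prev cs := by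
  induction cs with
  | nil => intro acc prev; simp [compact_json_goA]
  | cons c cs ih =>
      intro acc prev
      simp only [List.foldl_cons, compact_json_goA, compact_json_step]
      rw [ih]
      split <;> simp

-- A's continuation = filter after colon-space removal on the original string
theorem cj_goA_eq (cs : List Char) : ∀ (prev : List Char) (b : Bool),
    (prev = [':'] ↔ b = true) →
    compact_json_goA prev cs = (cjR b cs).filter cjNotWS := by
  induction cs with
  | nil => intro prev b _; simp [compact_json_goA, cjR]
  | cons c cs ih =>
      intro prev b hb
      simp only [compact_json_goA, cjR]
      rw [ih [c] (c == ':') (by simp)]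
      by_cases hbs : b = true ∧ c = ' '
      · have hp : prev = [':'] := hb.mpr hbs.1
        have hr : (b && c == ' ') = true := by simp [hbs.1, hbs.2]
        have hA : ¬ (c ∉ ['\n', '\t', '\r'] ∧ (prev ≠ [':'] ∨ (prev = [':'] ∧ c ≠ ' '))) := by
          rintro ⟨-, h | h⟩
          · exact h hp
          · exact h.2 hbs.2
        have hflag : (c == ':') = false := by simp [hbs.2]
        rw [hr, if_pos rfl, if_neg hA, hflag]
        simp
      · have hr : ¬ ((b && c == ' ') = true) := by
          simp only [Bool.and_eq_true, beq_iff_eq]; exact hbs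
        rw [if_neg hr, List.filter_cons]
        by_cases hn : cjNotWS c = true
        · have hws : c ∉ ['\n', '\t', '\r'] := by
            simp only [cjNotWS, Bool.not_eq_true', Bool.or_eq_false_iff,
              beq_eq_false_iff_ne, ne_eq] at hn
            simp only [List.mem_cons, List.not_mem_nil, or_false, not_or]
            exact ⟨hn.1.1, hn.1.2, hn.2⟩
          have hA : (c ∉ ['\n', '\t', '\r'] ∧ (prev ≠ [':'] ∨ (prev = [':'] ∧ c ≠ ' '))) := by
            refine ⟨hws, ?_⟩
            by_cases hp : prev = [':']
            · exact Or.inr ⟨hp, fun hc => hbs ⟨hb.mp hp, hc⟩⟩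
            · exact Or.inl hp
          rw [if_pos hA, hn]
          simp
        · have hA : ¬ (c ∉ ['\n', '\t', '\r'] ∧ (prev ≠ [':'] ∨ (prev = [':'] ∧ c ≠ ' '))) := by
            rintro ⟨hws, -⟩
            apply hn
            simp only [List.mem_cons, List.not_mem_nil, or_false, not_or] at hws
            simp only [cjNotWS, Bool.not_eq_true', Bool.or_eq_false_iff, beq_eq_false_iff_ne]
            exact ⟨⟨hws.1, hws.2.1⟩, hws.2.2⟩
          rw [if_neg hA, Bool.not_eq_true] at *
          rw [hn]
          simp

-- splitOn.go on sep = [':'] computes cjS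
theorem cj_splitOn_go (l : List Char) : ∀ (fuel : Nat) (cur : List Char) (acc : List (List Char)),
    l.length < fuel →
    PySem.Chars.splitOn.go [':'] fuel l cur acc = acc.reverse ++ cjS cur l := by
  induction l with
  | nil =>
      intro fuel cur acc h
      match fuel with
      | fuel + 1 => simp [PySem.Chars.splitOn.go, cjS]
  | cons c r ih =>
      intro fuel cur acc h
      match fuel with
      | fuel + 1 =>
        by_cases hc : c = ':'
        · have hpre : [':'].isPrefixOf (c :: r) = true := by simp [hc, List.isPrefixOf]
          rw [PySem.Chars.splitOn.go]
          simp only [hpre, if_pos]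
          have := ih fuel [] (cur.reverse :: acc) (by simpa using Nat.lt_of_succ_lt_succ h)
          simp only [List.length_cons, List.length_nil, List.drop_succ_cons, List.drop_zero]
          rw [this]
          simp [cjS, hc]
        · have hpre : [':'].isPrefixOf (c :: r) = false := by
            rw [List.isPrefixOf]
            simp only [Bool.and_eq_false_iff, beq_eq_false_iff_ne, ne_eq]
            exact Or.inl fun hh => hc hh.symm
          rw [PySem.Chars.splitOn.go]
          simp only [hpre, Bool.false_eq_true, if_neg, not_false_iff]
          rw [ih fuel (c :: cur) acc (Nat.lt_of_succ_lt_succ h)]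
          simp [cjS, hc]

theorem cj_splitOn_eq (cs : List Char) :
    PySem.Chars.splitOn cs [':'] = cjS [] cs := by
  unfold PySem.Chars.splitOn
  rw [cj_splitOn_go cs (cs.length + 1) [] [] (Nat.lt_succ_self _)]
  simp

theorem cj_strip1_eq (p : List Char) : compact_json_strip1 p = cjStripHead p := by
  unfold compact_json_strip1
  rw [show ((some 1 : Option Int)) = some ((1 : Nat) : Int) by norm_num,
    PySem.List.slice_to_natCast, PySem.List.slice_from_natCast]
  match p with
  | [] => simp [cjStripHead]
  | c :: t =>
      simp only [List.take_succ_cons, List.take_zero, List.drop_succ_cons, List.drop_zero]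
      by_cases hc : c = ' '
      · simp [hc, cjStripHead]
      · rw [if_neg (by simpa using hc)]
        simp [cjStripHead, hc]

theorem cj_intercalate_cons (a : List Char) (ps : List (List Char)) (h : ps ≠ []) :
    List.intercalate [':'] (a :: ps) = a ++ ':' :: List.intercalate [':'] ps := by
  match ps with
  | [] => exact absurd rfl h
  | b :: t => simp [List.intercalate, List.intersperse]

theorem cjS_ne_nil (cs : List Char) : ∀ cur, cjS cur cs ≠ [] := by
  induction cs with
  | nil => intro cur; simp [cjS]
  | cons c r ih =>
      intro cur
      by_cases hc : c = ':' <;> simp [cjS, hc, ih]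

-- cjR true strips exactly one leading space of cjR false
theorem cjR_true_eq (r : List Char) : cjR true r = cjStripHead (cjR false r) := by
  match r with
  | [] => simp [cjR, cjStripHead]
  | c :: t =>
      by_cases hc : c = ' '
      · simp [cjR, hc, cjStripHead]
      · have h1 : (c == ' ') = false := by simp [hc]
        simp [cjR, h1, cjStripHead, hc]

theorem cjStripHead_append (l m : List Char) (h : l ≠ []) :
    cjStripHead (l ++ m) = cjStripHead l ++ m := by
  match l with
  | [] => exact absurd rfl h
  | c :: t =>
      by_cases hc : c = ' '
      · simp [hc, cjStripHead]
      · simp [cjStripHead, hc]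

-- all-parts-stripped join = strip of the colon-space-removed string
theorem cj_join_all (r : List Char) : ∀ (cur : List Char),
    List.intercalate [':'] ((cjS cur r).map cjStripHead) =
      cjStripHead (cur.reverse ++ cjR false r) := by
  induction r with
  | nil => intro cur; simp [cjS, cjR, List.intercalate]
  | cons c r ih =>
      intro cur
      by_cases hc : c = ':'
      · have hcb : (c == ':') = true := by simp [hc]
        simp only [cjS, hc, if_pos, List.map_cons, cjR]
        have hne : (cjS [] r).map cjStripHead ≠ [] := by
          simp [cjS_ne_nil]
        rw [cj_intercalate_cons _ _ hne, ih []]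
        rw [if_neg (by simp)]
        simp only [List.reverse_nil, List.nil_append, beq_self_eq_true, ← cjR_true_eq]
        by_cases hcur : cur = []
        · subst hcur
          simp [cjStripHead]
        · rw [show cur.reverse ++ ':' :: cjR true r = (cur.reverse ++ [':']) ++ cjR true r by simp,
            cjStripHead_append _ (cjR true r) (by simp),
            cjStripHead_append _ [':'] (by simp [hcur])]
          simp
      · have hcb : (c == ':') = false := by simp [hc]
        simp only [cjS, hc, if_neg, not_false_iff, cjR, hcb]
        rw [ih (c :: cur)]
        by_cases hsp : c = ' '
        · simp [hsp]
        · have h1 : (c == ' ') = false := by simp [hsp]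
          simp [h1]

-- tail-parts-stripped join = the colon-space-removed original string
theorem cj_join_tail (r : List Char) : ∀ (cur : List Char),
    List.intercalate [':']
        (match cjS cur r with
         | [] => []
         | p :: ps => p :: ps.map cjStripHead) =
      cur.reverse ++ cjR false r := by
  induction r with
  | nil => intro cur; simp [cjS, cjR, List.intercalate]
  | cons c r ih =>
      intro cur
      by_cases hc : c = ':'
      · have hcb : (c == ':') = true := by simp [hc]
        have h1 : (c == ' ') = false := by simp [hc]
        simp only [cjS, hc, if_pos, cjR]
        have hne : (cjS [] r).map cjStripHead ≠ [] := by simp [cjS_ne_nil]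
        rw [cj_intercalate_cons _ _ hne, cj_join_all r []]
        simp [← cjR_true_eq]
      · have hcb : (c == ':') = false := by simp [hc]
        simp only [cjS, hc, if_neg, not_false_iff, cjR, hcb]
        rw [ih (c :: cur)]
        by_cases hsp : c = ' '
        · simp [hsp]
        · have h1 : (c == ' ') = false := by simp [hsp]
          simp [h1]

theorem compact_json_eq (content : String) :
    compact_json content = compact_json_alt content := by
  unfold compact_json compact_json_alt
  rw [compact_json_foldA, cj_splitOn_eq]
  rcases hS : cjS [] content.toList with _ | ⟨p, ps⟩
  · exact absurd hS (cjS_ne_nil content.toList [])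
  · simp only [PySem.Chars.join]
    have hmap : ps.map compact_json_strip1 = ps.map cjStripHead :=
      List.map_congr_left fun x _ => cj_strip1_eq x
    rw [hmap]
    have := cj_join_tail content.toList []
    rw [hS] at this
    simp only [List.reverse_nil, List.nil_append] at this
    rw [this]
    rw [cj_goA_eq content.toList [] false (by simp)]
    rfl

-- ===== VERDICT (by name: the statement is the Claim_ definition above) =====
theorem compact_json_spec : Claim_equal_compact_json := by
  intro content _
  exact compact_json_eq content
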